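-- pv_equiv track=rewrite | github.com/e1pang/CV-Applied-to-a-Game | cnn-1-gather_data.py | force
-- ===== SOURCE A (Python) =====
-- def force(number, start=0, end=350,interval=50):
--     allowed = [i for i in range(start,end,interval)]
--     diff = abs(number - allowed[0])
--     index = 0
--     for i in range(1,len(allowed)):
--         if abs(number - allowed[i])< diff:
--             diff = abs(number - allowed[i])
--             index = i
--     return allowed[index]
-- ===== SOURCE B (Python) =====
-- def force(number, start=0, end=350, interval=50):
--     # O(1): closed-form nearest index into the arithmetic progression, with
--     # round-half-down so ties pick the lowest index like A's strict '<'.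
--     r = range(start, end, interval)
--     n = len(r)
--     u = abs(interval)
--     d = number - start if interval > 0 else start - number
--     idx = (2 * d + u - 1) // (2 * u)
--     idx = max(0, min(n - 1, idx))
--     return r[idx]
-- ===== Notes on version B (the rewrite author's own statement) =====
-- stated objective: faster
-- what changed: Replaces A's O(n) linear scan over the whole arithmetic progression with an O(1) closed-form integer index computation (round-half-down division plus clamping) indexing directly into the range object.
import Mathlib
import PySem

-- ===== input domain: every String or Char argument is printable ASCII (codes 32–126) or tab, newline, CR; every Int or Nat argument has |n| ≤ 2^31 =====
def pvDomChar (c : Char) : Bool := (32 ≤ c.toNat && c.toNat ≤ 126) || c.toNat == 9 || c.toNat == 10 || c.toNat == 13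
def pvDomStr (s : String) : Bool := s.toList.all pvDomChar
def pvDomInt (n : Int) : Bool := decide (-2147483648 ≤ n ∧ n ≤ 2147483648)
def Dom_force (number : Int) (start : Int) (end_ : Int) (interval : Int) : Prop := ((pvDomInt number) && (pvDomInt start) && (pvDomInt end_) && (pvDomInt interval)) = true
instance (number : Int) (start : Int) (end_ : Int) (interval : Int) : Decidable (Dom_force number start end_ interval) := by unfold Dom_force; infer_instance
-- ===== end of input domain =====

-- B replaces A's linear scan of the whole progression by an O(1) closed-form
-- index computation (round-half-down integer division, then clamping).

-- ===== PORT A =====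
def force (number : Int) (start : Int) (end_ : Int) (interval : Int) : Int :=
  let allowed := PySem.List.pyRange start end_ interval
  let diff := |number - PySem.List.pyGetD allowed 0 0|
  let st := (PySem.List.pyRange 1 ((allowed.length : Int)) 1).foldl
    (fun (st : Int × Int) i =>
      if |number - PySem.List.pyGetD allowed i 0| < st.1 then
        (|number - PySem.List.pyGetD allowed i 0|, i)
      else st)
    (diff, 0)
  PySem.List.pyGetD allowed st.2 0

-- ===== PORT B =====
def force_alt (number : Int) (start : Int) (end_ : Int) (interval : Int) : Int :=
  let r := PySem.List.pyRange start end_ interval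
  let n : Int := (r.length : Int)
  let u := |interval|
  let d := if 0 < interval then number - start else start - number
  let idx := PySem.Int.floordiv (2 * d + u - 1) (2 * u)
  let idx2 := max 0 (min (n - 1) idx)
  PySem.List.pyGetD r idx2 0

-- ===== PRECONDITION & SPEC =====
-- Pre_ excludes exactly the inputs where A raises: interval = 0 (range raises
-- ValueError) and an empty range (allowed[0] raises IndexError).
def Pre_force (number : Int) (start : Int) (end_ : Int) (interval : Int) : Prop :=
  (0 < interval ∧ start < end_) ∨ (interval < 0 ∧ end_ < start)
instance (number : Int) (start : Int) (end_ : Int) (interval : Int) : Decidable (Pre_force number start end_ interval) := by unfold Pre_force; infer_instance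

def pvWitness_force : Int × Int × Int × Int := (130, 0, 350, 50)

def Spec_force (number : Int) (start : Int) (end_ : Int) (interval : Int) (out : Int) : Prop := out = force_alt number start end_ interval
instance (number : Int) (start : Int) (end_ : Int) (interval : Int) (out : Int) : Decidable (Spec_force number start end_ interval out) := by unfold Spec_force; infer_instance

-- ===== CLAIM (what is proved, stated in full; the proofs are below) =====
def Claim_equal_force : Prop := ∀ (number : Int) (start : Int) (end_ : Int) (interval : Int), Dom_force number start end_ interval → Pre_force number start end_ interval → Spec_force number start end_ interval (force number start end_ interval)

-- ===== LEMMAS AND PROOFS =====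

-- distance moves: |t| vs |t - u|
lemma pv_step_up (t u : Int) (hu : 0 < u) (h : 2 * t ≤ u) : |t| ≤ |t - u| := by
  rcases abs_cases t with ⟨h1, h2⟩ <;> rcases abs_cases (t - u) with ⟨h3, h4⟩ <;> omega

lemma pv_step_down (t u : Int) (hu : 0 < u) (h : u < 2 * t) : |t - u| < |t| := by
  rcases abs_cases t with ⟨h1, h2⟩ <;> rcases abs_cases (t - u) with ⟨h3, h4⟩ <;> omega

lemma pv_fdiv_bounds (q b : Int) (hb : 0 < b) :
    b * PySem.Int.floordiv q b ≤ q ∧ q < b * PySem.Int.floordiv q b + b := by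
  unfold PySem.Int.floordiv
  rw [Int.fdiv_eq_ediv]
  have h1 := Int.ediv_add_emod q b
  have h2 := Int.emod_nonneg q (ne_of_gt hb)
  have h3 := Int.emod_lt_of_pos q hb
  have h4 : (if 0 ≤ b ∨ b ∣ q then (0:Int) else 1) = 0 := by
    simp [le_of_lt hb]
  rw [h4]
  constructor <;> linarith

lemma pv_chain_up (dd u m : Int) (hu : 0 < u) (hm : 2 * dd ≤ u * (2 * m + 1)) :
    ∀ (k : Nat) (a : Int), m ≤ a → |dd - u * a| ≤ |dd - u * (a + k)| := by
  intro k
  induction k with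
  | zero => intro a _; simp
  | succ k ih =>
    intro a ha
    have h1 : |dd - u * a| ≤ |dd - u * (a + k)| := ih a ha
    have h2 : |dd - u * (a + k)| ≤ |dd - u * (a + (k + 1 : Nat))| := by
      have ht : 2 * (dd - u * (a + k)) ≤ u := by
        have : u * m ≤ u * (a + k) := by
          apply mul_le_mul_of_nonneg_left _ (le_of_lt hu)
          have : (0:Int) ≤ (k:Int) := Int.natCast_nonneg k
          linarith
        linarith
      have := pv_step_up (dd - u * (a + k)) u hu ht
      have he : dd - u * (a + k) - u = dd - u * (a + (k + 1 : Nat)) := by push_cast; ring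
      rwa [he] at this
    exact le_trans h1 h2

lemma pv_step1 (dd u m : Int) (hu : 0 < u) (hlo : u * (2 * m - 1) < 2 * dd)
    (j : Int) (hj : j + 1 ≤ m) : |dd - u * (j + 1)| < |dd - u * j| := by
  have ht : u < 2 * (dd - u * j) := by
    have : u * (2 * (j + 1) - 1) ≤ u * (2 * m - 1) := by
      apply mul_le_mul_of_nonneg_left _ (le_of_lt hu)
      linarith
    nlinarith
  have := pv_step_down (dd - u * j) u hu ht
  have he : dd - u * j - u = dd - u * (j + 1) := by ring
  rwa [he] at this

lemma pv_chain_down (dd u m : Int) (hu : 0 < u) (hlo : u * (2 * m - 1) < 2 * dd) :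
    ∀ (k : Nat) (j : Int), j + k + 1 ≤ m → |dd - u * (j + k + 1)| < |dd - u * j| := by
  intro k
  induction k with
  | zero =>
    intro j hj
    have := pv_step1 dd u m hu hlo j (by push_cast at hj; linarith)
    have he : j + (0:Nat) + 1 = j + 1 := by push_cast; ring
    rwa [he]
  | succ k ih =>
    intro j hj
    have h1 : |dd - u * (j + 1 + k + 1)| < |dd - u * (j + 1)| := by
      apply ih (j + 1); push_cast at hj ⊢; linarith
    have h2 : |dd - u * (j + 1)| < |dd - u * j| := by
      apply pv_step1 dd u m hu hlo j
      have : (0:Int) ≤ (k:Int) := Int.natCast_nonneg k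
      push_cast at hj; linarith
    have he : j + ((k:Nat) + 1 : Nat) + 1 = j + 1 + (k:Int) + 1 := by push_cast; ring
    rw [he]
    exact lt_trans h1 h2

-- c = clamp of m into [0, cnt-1] is the first argmin of j ↦ |dd - u*j| on [0, cnt)
lemma pv_P (dd u m cnt : Int) (hu : 0 < u) (hcnt : 1 ≤ cnt)
    (hlo : u * (2 * m - 1) < 2 * dd) (hhi : 2 * dd ≤ u * (2 * m + 1)) :
    (∀ j, 0 ≤ j → j < cnt → |dd - u * (max 0 (min (cnt - 1) m))| ≤ |dd - u * j|) ∧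
    (∀ j, 0 ≤ j → j < max 0 (min (cnt - 1) m) → |dd - u * (max 0 (min (cnt - 1) m))| < |dd - u * j|) := by
  set c := max 0 (min (cnt - 1) m) with hc
  have hc0 : 0 ≤ c := le_max_left _ _
  have hstrict : ∀ j, 0 ≤ j → j < c → |dd - u * c| < |dd - u * j| := by
    intro j hj0 hjc
    have hcm : c ≤ m := by omega
    have hk : ((c - j - 1).toNat : Int) = c - j - 1 := Int.toNat_of_nonneg (by omega)
    have h2 := pv_chain_down dd u m hu hlo (c - j - 1).toNat j (by rw [hk]; omega)
    rw [hk] at h2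
    have he : j + (c - j - 1) + 1 = c := by ring
    rwa [he] at h2
  refine ⟨?_, hstrict⟩
  intro j hj0 hjlt
  rcases lt_trichotomy j c with h | h | h
  · exact le_of_lt (hstrict j hj0 h)
  · rw [h]
  · have hmc : m ≤ c := by omega
    have hk : ((j - c).toNat : Int) = j - c := Int.toNat_of_nonneg (by omega)
    have h2 := pv_chain_up dd u m hu hhi (j - c).toNat c hmc
    rw [hk] at h2
    have he : c + (j - c) = j := by ring
    rwa [he] at h2

-- A's scan as a named loop (used only by the proofs)
def pvLoop (hh : Int → Int) (b : Int) : Int × Int :=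
  (PySem.List.pyRange 1 b 1).foldl
    (fun (st : Int × Int) i => if hh i < st.1 then (hh i, i) else st) (hh 0, 0)

-- loop invariant: pvLoop computes the first argmin of hh on [0, b)
lemma pv_fold (hh : Int → Int) :
    ∀ (k : Nat),
      0 ≤ (pvLoop hh (1 + (k : Int))).2 ∧ (pvLoop hh (1 + (k : Int))).2 < 1 + (k : Int) ∧
      (pvLoop hh (1 + (k : Int))).1 = hh (pvLoop hh (1 + (k : Int))).2 ∧
      (∀ j, 0 ≤ j → j < 1 + (k : Int) → (pvLoop hh (1 + (k : Int))).1 ≤ hh j) ∧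
      (∀ j, 0 ≤ j → j < (pvLoop hh (1 + (k : Int))).2 → (pvLoop hh (1 + (k : Int))).1 < hh j) := by
  intro k
  induction k with
  | zero =>
    have h0 : pvLoop hh (1 + ((0 : Nat) : Int)) = (hh 0, 0) := by
      unfold pvLoop
      rw [show (1 + ((0:Nat):Int)) = 1 by norm_num, PySem.List.pyRange_one_eq_nil (le_refl 1)]
      rfl
    rw [h0]
    refine ⟨le_refl 0, by norm_num, rfl, ?_, ?_⟩
    · intro j hj0 hj1
      have : j = 0 := by omega
      rw [this]
    · intro j hj0 hj; omega
  | succ k ih =>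
    have hstep : pvLoop hh (1 + ((k + 1 : Nat) : Int)) =
        (if hh (1 + (k : Int)) < (pvLoop hh (1 + (k : Int))).1
          then (hh (1 + (k : Int)), 1 + (k : Int)) else pvLoop hh (1 + (k : Int))) := by
      unfold pvLoop
      rw [show (1 + ((k + 1 : Nat) : Int)) = (1 + (k : Int)) + 1 by push_cast; ring,
        PySem.List.pyRange_one_succ_right (by omega), List.foldl_append]
      rfl
    obtain ⟨i1, i2, i3, i4, i5⟩ := ih
    rw [hstep]
    by_cases hcase : hh (1 + (k : Int)) < (pvLoop hh (1 + (k : Int))).1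
    · rw [if_pos hcase]
      refine ⟨by omega, by push_cast; omega, rfl, ?_, ?_⟩
      · intro j hj0 hjlt
        rcases lt_or_ge j (1 + (k : Int)) with h | h
        · exact le_of_lt (lt_of_lt_of_le hcase (i4 j hj0 h))
        · have : j = 1 + (k : Int) := by push_cast at hjlt; omega
          rw [this]
      · intro j hj0 hjlt
        exact lt_of_lt_of_le hcase (i4 j hj0 hjlt)
    · rw [if_neg hcase]
      refine ⟨i1, by push_cast; omega, i3, ?_, i5⟩
      intro j hj0 hjlt
      rcases lt_or_ge j (1 + (k : Int)) with h | h
      · exact i4 j hj0 h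
      · have : j = 1 + (k : Int) := by push_cast at hjlt; omega
        rw [this]; omega


-- uniqueness: the loop's index is the clamped closed-form index
lemma pv_argmin_eq (dd u m : Int) (C : Nat) (hu : 0 < u) (hC : 1 ≤ C)
    (hlo : u * (2 * m - 1) < 2 * dd) (hhi : 2 * dd ≤ u * (2 * m + 1)) :
    (pvLoop (fun i => |dd - u * i|) (C : Int)).2 = max 0 (min ((C : Int) - 1) m) := by
  have hcast : (1 : Int) + ((C - 1 : Nat) : Int) = (C : Int) := by
    have : ((C - 1 : Nat) : Int) = (C : Int) - 1 := by omega
    rw [this]; ring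
  have hf := pv_fold (fun i => |dd - u * i|) (C - 1)
  rw [hcast] at hf
  obtain ⟨i1, i2, i3, i4, i5⟩ := hf
  have hCnt : (1 : Int) ≤ (C : Int) := by exact_mod_cast hC
  obtain ⟨p1, p2⟩ := pv_P dd u m (C : Int) hu hCnt hlo hhi
  set st := pvLoop (fun i => |dd - u * i|) (C : Int)
  set c := max 0 (min ((C : Int) - 1) m) with hc
  have hc0 : 0 ≤ c := le_max_left _ _
  have hclt : c < (C : Int) := by omega
  rcases lt_trichotomy st.2 c with h | h | h
  · exfalso
    have h1 := p2 st.2 i1 h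
    have h2 := i4 c hc0 hclt
    rw [i3] at h2
    linarith
  · exact h
  · exfalso
    have h1 := i5 c hc0 h
    have h2 := p1 st.2 i1 i2
    rw [i3] at h1
    linarith

lemma pv_main (number start end_ interval : Int) (C : Nat) (dd u : Int)
    (hu : 0 < u) (hC : 1 ≤ C)
    (hall : PySem.List.pyRange start end_ interval = List.map (fun k : Nat => start + interval * (k : Int)) (List.range C))
    (hdist : ∀ i : Int, |number - (start + interval * i)| = |dd - u * i|)
    (hueq : |interval| = u)
    (hdeq : (if 0 < interval then number - start else start - number) = dd) :
    force number start end_ interval = force_alt number start end_ interval := by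
  have hget : ∀ i : Int, 0 ≤ i → i < (C : Int) →
      PySem.List.pyGetD (PySem.List.pyRange start end_ interval) i 0 = start + interval * i := by
    intro i h0 hlt
    rw [hall, PySem.List.pyGetD_of_nonneg _ _ h0,
      PySem.List.getD_map_range _ _ _ _ (by omega : i.toNat < C), Int.toNat_of_nonneg h0]
  have hlen : (((PySem.List.pyRange start end_ interval).length : Nat) : Int) = (C : Int) := by
    rw [hall]; simp
  set m := PySem.Int.floordiv (2 * dd + u - 1) (2 * u) with hm
  have hb := pv_fdiv_bounds (2 * dd + u - 1) (2 * u) (by linarith)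
  rw [← hm] at hb
  have hlo : u * (2 * m - 1) < 2 * dd := by nlinarith [hb.1, hb.2]
  have hhi : 2 * dd ≤ u * (2 * m + 1) := by nlinarith [hb.1, hb.2]
  have hinit : |number - PySem.List.pyGetD (PySem.List.pyRange start end_ interval) 0 0| = |dd - u * 0| := by
    rw [hget 0 (le_refl 0) (by exact_mod_cast hC), hdist 0]
  have hcong : (PySem.List.pyRange 1 ((C : Int)) 1).foldl
      (fun (st : Int × Int) i =>
        if |number - PySem.List.pyGetD (PySem.List.pyRange start end_ interval) i 0| < st.1 then
          (|number - PySem.List.pyGetD (PySem.List.pyRange start end_ interval) i 0|, i)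
        else st)
      (|number - PySem.List.pyGetD (PySem.List.pyRange start end_ interval) 0 0|, 0)
      = pvLoop (fun i => |dd - u * i|) (C : Int) := by
    unfold pvLoop
    rw [hinit]
    apply PySem.List.foldl_congr_mem
    intro acc x hx
    rw [PySem.List.mem_pyRange_one] at hx
    have e : |number - PySem.List.pyGetD (PySem.List.pyRange start end_ interval) x 0| = |dd - u * x| := by
      rw [hget x (by omega) (by omega), hdist x]
    rw [e]
  have hidx := pv_argmin_eq dd u m C hu hC hlo hhi
  unfold force force_alt
  simp only [hlen, hueq, hdeq]
  rw [← hm, hcong, hidx]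
lemma pv_count_pos (a b : Int) (hb : 0 < b) (ha : 0 < a) : 1 ≤ ((a + b - 1) / b).toNat := by
  have h1 : (1 : Int) ≤ (a + b - 1) / b := by
    rw [Int.le_ediv_iff_mul_le hb]; linarith
  omega

-- ===== VERDICT (by name: the statement is the Claim_ definition above) =====
theorem force_spec : Claim_equal_force := by
  intro number start end_ interval _ hpre
  unfold Spec_force
  rcases hpre with ⟨h1, h2⟩ | ⟨h1, h2⟩
  · have hne : interval ≠ 0 := by omega
    apply pv_main number start end_ interval ((end_ - start + interval - 1) / interval).toNat
      (number - start) interval h1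
    · exact pv_count_pos (end_ - start) interval h1 (by omega)
    · simp only [PySem.List.pyRange, if_neg hne, if_pos h1, if_pos h2]
    · intro i; congr 1; ring
    · exact abs_of_pos h1
    · exact if_pos h1
  · have hne : interval ≠ 0 := by omega
    apply pv_main number start end_ interval ((start - end_ + -interval - 1) / -interval).toNat
      (start - number) (-interval) (by omega)
    · exact pv_count_pos (start - end_) (-interval) (by omega) (by omega)
    · simp only [PySem.List.pyRange, if_neg hne, if_neg (by omega : ¬ (0 < interval)), if_pos h2]
    · intro i
      rw [show number - (start + interval * i) = -((start - number) - (-interval) * i) by ring, abs_neg]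
    · exact abs_of_neg h1
    · exact if_neg (by omega)
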